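-- pv_equiv track=rewrite | github.com/Uptonr3421/Marketing | extract_small_businesses.py | is_small_business
-- ===== SOURCE A (Python) =====
-- SMALL_BUSINESS_INDICATORS = [
--     'LLC', 'Consulting', 'Studio', 'Shop', 'Boutique', 'Catering', 'Photography',
--     'Design', 'Coaching', 'Services', 'Consulting', 'Group', 'Soap', 'Wellness',
--     'Therapy', 'Counseling', 'Creative', 'Media', 'Event', 'Planning', 'Floral',
--     'Hair', 'Salon', 'Spa', 'Fitness', 'Yoga', 'Massage', 'Bakery', 'Cafe',
--     'Restaurant', 'Bar', 'Lounge', 'Venue', 'Realty', 'Real Estate', 'Law',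
--     'Legal', 'Accounting', 'Financial', 'Insurance', 'Marketing', 'Advertising',
--     'Web', 'Digital', 'Graphic', 'Video', 'Film', 'Music', 'Entertainment',
--     'Limousine', 'Transportation', 'Travel', 'Tours', 'Cleaning', 'Maintenance',
--     'Repair', 'Construction', 'Landscaping', 'Painting', 'Plumbing', 'Electrical'
-- ]
--
-- EXCLUDE_COMPANIES = [
--     'FirstEnergy', 'Diebold Nixdorf', 'American Greetings', 'Goodyear',
--     'J.M. Smucker', 'Nestle', 'PNC Bank', 'Huntington Bank', 'KeyBank',
--     'Cleveland Cavaliers', 'Playhouse Square', 'Medical Mutual', 'Anthem',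
--     'MetroHealth', 'Cleveland Clinic', 'University Hospitals', 'Summa Health',
--     'Cleveland Public Library', 'Cuyahoga County', 'Cleveland State University',
--     'Kent State', 'Case Western', 'Oberlin College', 'Cleveland Foundation',
--     'United Way', 'Greater Cleveland', 'Destination Cleveland', 'WKYC',
--     'Plain Dealer', 'Cleveland.com', 'Sherwin-Williams', 'Progressive',
--     'Eaton', 'Parker Hannifin', 'TimkenSteel', 'Avery Dennison', 'OverDrive',
--     'Hyland Software', 'Westfield', 'GCRTA', 'RTA', 'Regional Transit'
-- ]
--
-- def is_small_business(company):
--     """Determine if company is a small business."""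
--     # Check if it's a large corporation to exclude
--     for exclude in EXCLUDE_COMPANIES:
--         if exclude.lower() in company.lower():
--             return False
--
--     # Check for small business indicators
--     for indicator in SMALL_BUSINESS_INDICATORS:
--         if indicator.lower() in company.lower():
--             return True
--
--     return False
-- ===== SOURCE B (Python) =====
-- # B: hand-maintained lowercase pattern lists, indexed once by first character;
-- # classification is one left-to-right scan of the lowered name, testing only the
-- # patterns bucketed under the character at each position (exclude wins, as in A).
--
-- _EXCLUDE_LOWER = [
--     'firstenergy', 'diebold nixdorf', 'american greetings', 'goodyear', 'j.m. smucker', 'nestle',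
--     'pnc bank', 'huntington bank', 'keybank', 'cleveland cavaliers', 'playhouse square',
--     'medical mutual', 'anthem', 'metrohealth', 'cleveland clinic', 'university hospitals',
--     'summa health', 'cleveland public library', 'cuyahoga county', 'cleveland state university',
--     'kent state', 'case western', 'oberlin college', 'cleveland foundation', 'united way',
--     'greater cleveland', 'destination cleveland', 'wkyc', 'plain dealer', 'cleveland.com',
--     'sherwin-williams', 'progressive', 'eaton', 'parker hannifin', 'timkensteel',
--     'avery dennison', 'overdrive', 'hyland software', 'westfield', 'gcrta', 'rta',
--     'regional transit'
-- ]
--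
-- _INDICATOR_LOWER = [
--     'llc', 'consulting', 'studio', 'shop', 'boutique', 'catering', 'photography', 'design',
--     'coaching', 'services', 'consulting', 'group', 'soap', 'wellness', 'therapy', 'counseling',
--     'creative', 'media', 'event', 'planning', 'floral', 'hair', 'salon', 'spa', 'fitness',
--     'yoga', 'massage', 'bakery', 'cafe', 'restaurant', 'bar', 'lounge', 'venue', 'realty',
--     'real estate', 'law', 'legal', 'accounting', 'financial', 'insurance', 'marketing',
--     'advertising', 'web', 'digital', 'graphic', 'video', 'film', 'music', 'entertainment',
--     'limousine', 'transportation', 'travel', 'tours', 'cleaning', 'maintenance', 'repair',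
--     'construction', 'landscaping', 'painting', 'plumbing', 'electrical'
-- ]
--
--
-- def _build_index(lowered_patterns):
--     """Group the lowercase patterns by their first character."""
--     d = {}
--     for p in lowered_patterns:
--         d[p[0]] = d.get(p[0], []) + [p]
--     return d
--
--
-- _EXCLUDE_INDEX = _build_index(_EXCLUDE_LOWER)
-- _INDICATOR_INDEX = _build_index(_INDICATOR_LOWER)
--
--
-- def _matches_any(text, index):
--     """One left-to-right scan: at each position test with startswith only the
--     patterns bucketed under the character found there."""
--     for start, ch in enumerate(text):
--         for p in index.get(ch, []):
--             if text.startswith(p, start):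
--                 return True
--     return False
--
--
-- def is_small_business(company):
--     """Determine if company is a small business."""
--     c = company.lower()
--     if _matches_any(c, _EXCLUDE_INDEX):
--         return False
--     return _matches_any(c, _INDICATOR_INDEX)
-- ===== Notes on version B (the rewrite author's own statement) =====
-- stated objective: alternative
-- what changed: B keeps hand-written lowercase pattern lists grouped at import time into a dict keyed by first character, lowercases the company once, and classifies with a single left-to-right scan testing startswith only for the patterns bucketed under the character at each position, instead of A's pattern-outer loops that re-lowercase the company and run a full substring search per pattern.
import Mathlib
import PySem

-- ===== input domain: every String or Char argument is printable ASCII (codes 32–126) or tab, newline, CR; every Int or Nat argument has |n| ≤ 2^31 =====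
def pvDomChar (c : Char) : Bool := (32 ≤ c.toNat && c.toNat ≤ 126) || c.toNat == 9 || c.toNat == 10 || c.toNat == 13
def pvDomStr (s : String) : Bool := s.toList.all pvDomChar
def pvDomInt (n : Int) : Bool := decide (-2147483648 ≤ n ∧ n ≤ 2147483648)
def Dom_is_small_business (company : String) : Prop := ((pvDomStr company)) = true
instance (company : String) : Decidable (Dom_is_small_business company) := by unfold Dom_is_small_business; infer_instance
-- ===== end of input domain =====

-- B replaces A's pattern-outer loops (each re-lowercasing the company and doing its own
-- substring search) with hand-written lowercase pattern lists indexed by first character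
-- and one position-outer scan of the lowered text; same result, alternative structure.

-- ===== PORT A =====
def SMALL_BUSINESS_INDICATORS : List String := [
  "LLC", "Consulting", "Studio", "Shop", "Boutique", "Catering", "Photography",
  "Design", "Coaching", "Services", "Consulting", "Group", "Soap", "Wellness",
  "Therapy", "Counseling", "Creative", "Media", "Event", "Planning", "Floral",
  "Hair", "Salon", "Spa", "Fitness", "Yoga", "Massage", "Bakery", "Cafe",
  "Restaurant", "Bar", "Lounge", "Venue", "Realty", "Real Estate", "Law",
  "Legal", "Accounting", "Financial", "Insurance", "Marketing", "Advertising",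
  "Web", "Digital", "Graphic", "Video", "Film", "Music", "Entertainment",
  "Limousine", "Transportation", "Travel", "Tours", "Cleaning", "Maintenance",
  "Repair", "Construction", "Landscaping", "Painting", "Plumbing", "Electrical"]

def EXCLUDE_COMPANIES : List String := [
  "FirstEnergy", "Diebold Nixdorf", "American Greetings", "Goodyear",
  "J.M. Smucker", "Nestle", "PNC Bank", "Huntington Bank", "KeyBank",
  "Cleveland Cavaliers", "Playhouse Square", "Medical Mutual", "Anthem",
  "MetroHealth", "Cleveland Clinic", "University Hospitals", "Summa Health",
  "Cleveland Public Library", "Cuyahoga County", "Cleveland State University",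
  "Kent State", "Case Western", "Oberlin College", "Cleveland Foundation",
  "United Way", "Greater Cleveland", "Destination Cleveland", "WKYC",
  "Plain Dealer", "Cleveland.com", "Sherwin-Williams", "Progressive",
  "Eaton", "Parker Hannifin", "TimkenSteel", "Avery Dennison", "OverDrive",
  "Hyland Software", "Westfield", "GCRTA", "RTA", "Regional Transit"]

-- A's for-loop with early return: scan the pattern list, testing `pat.lower() in company.lower()`.
def aScan (company : String) : List String → Bool
  | [] => false
  | e :: rest =>
      if PySem.Str.isIn (PySem.Str.lower e) (PySem.Str.lower company) then true
      else aScan company rest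

def is_small_business (company : String) : Bool :=
  if aScan company EXCLUDE_COMPANIES then false
  else aScan company SMALL_BUSINESS_INDICATORS

-- ===== PORT B =====
def EXCLUDE_LOWER : List String := [
  "firstenergy", "diebold nixdorf", "american greetings", "goodyear", "j.m. smucker", "nestle",
  "pnc bank", "huntington bank", "keybank", "cleveland cavaliers", "playhouse square",
  "medical mutual", "anthem", "metrohealth", "cleveland clinic", "university hospitals",
  "summa health", "cleveland public library", "cuyahoga county", "cleveland state university",
  "kent state", "case western", "oberlin college", "cleveland foundation", "united way",
  "greater cleveland", "destination cleveland", "wkyc", "plain dealer", "cleveland.com",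
  "sherwin-williams", "progressive", "eaton", "parker hannifin", "timkensteel",
  "avery dennison", "overdrive", "hyland software", "westfield", "gcrta", "rta",
  "regional transit"]

def INDICATOR_LOWER : List String := [
  "llc", "consulting", "studio", "shop", "boutique", "catering", "photography", "design",
  "coaching", "services", "consulting", "group", "soap", "wellness", "therapy", "counseling",
  "creative", "media", "event", "planning", "floral", "hair", "salon", "spa", "fitness",
  "yoga", "massage", "bakery", "cafe", "restaurant", "bar", "lounge", "venue", "realty",
  "real estate", "law", "legal", "accounting", "financial", "insurance", "marketing",
  "advertising", "web", "digital", "graphic", "video", "film", "music", "entertainment",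
  "limousine", "transportation", "travel", "tours", "cleaning", "maintenance", "repair",
  "construction", "landscaping", "painting", "plumbing", "electrical"]

-- _build_index: group the already-lowercase patterns by their first character
-- (p[0] is ported as List.headI: every pattern in both literal lists is non-empty,
--  so the default-for-[] of headI is never used and the port is exact)
def bBuildIndex (lowered : List String) : PySem.Dict Char (List (List Char)) :=
  lowered.foldl
    (fun d p =>
      let q := p.toList
      d.modify q.headI [] (fun v => v ++ [q]))
    PySem.Dict.empty

-- first-character indexes, built once "at import time"
def bExcludeIndex : PySem.Dict Char (List (List Char)) := bBuildIndex EXCLUDE_LOWER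
def bIndicatorIndex : PySem.Dict Char (List (List Char)) := bBuildIndex INDICATOR_LOWER

-- inner loop of _matches_any: does some candidate pattern start at this offset?
def bStartsHere (t : List Char) : List (List Char) → Bool
  | [] => false
  | p :: rest => if PySem.Chars.startswith t p then true else bStartsHere t rest

-- outer loop of _matches_any: walk the positions left to right (= the suffixes),
-- looking up only the patterns indexed under the character at that position
def bMatchesAny (index : PySem.Dict Char (List (List Char))) : List Char → Bool
  | [] => false
  | c :: rest =>
      if bStartsHere (c :: rest) (index.getD c []) then true else bMatchesAny index rest

def is_small_business_alt (company : String) : Bool :=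
  let c := PySem.Chars.lower company.toList
  if bMatchesAny bExcludeIndex c then false
  else bMatchesAny bIndicatorIndex c

-- ===== PRECONDITION & SPEC =====
def Spec_is_small_business (company : String) (out : Bool) : Prop := out = is_small_business_alt company
instance (company : String) (out : Bool) : Decidable (Spec_is_small_business company out) := by unfold Spec_is_small_business; infer_instance

-- ===== CLAIM =====
def Claim_equal_is_small_business : Prop := ∀ (company : String), Dom_is_small_business company → Spec_is_small_business company (is_small_business company)

-- ===== LEMMAS AND PROOFS =====

theorem bStartsHere_iff (t : List Char) (ps : List (List Char)) :
    bStartsHere t ps = true ↔ ∃ p ∈ ps, p <+: t := by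
  induction ps with
  | nil => simp [bStartsHere]
  | cons p rest ih =>
      simp only [bStartsHere]
      split_ifs with h
      · simp only [true_iff]
        exact ⟨p, List.mem_cons_self, (PySem.Chars.startswith_iff t p).mp h⟩
      · rw [ih]
        constructor
        · rintro ⟨q, hq, hpre⟩; exact ⟨q, List.mem_cons_of_mem _ hq, hpre⟩
        · rintro ⟨q, hq, hpre⟩
          rcases List.mem_cons.mp hq with rfl | hq'
          · exact absurd ((PySem.Chars.startswith_iff t q).mpr hpre) h
          · exact ⟨q, hq', hpre⟩

-- the index groups exactly: the bucket of c holds the patterns whose head is c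
theorem getD_bBuildIndex (lowered : List String) (c : Char) :
    (bBuildIndex lowered).getD c []
      = ((lowered.map (fun p => p.toList)).filter (fun q => q.headI == c)) := by
  unfold bBuildIndex
  have hfold :
      lowered.foldl
        (fun d p =>
          let q := p.toList
          d.modify q.headI [] (fun v => v ++ [q]))
        PySem.Dict.empty
      = ((lowered.map (fun p => (p.toList.headI, p.toList))).foldl
          (fun d q => d.modify q.1 [] (fun v => v ++ [q.2])) PySem.Dict.empty) := by
    rw [List.foldl_map]
  rw [hfold, PySem.Dict.getD_foldl_modify_append]
  simp [PySem.Dict.getD_empty, List.filter_map, Function.comp_def]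

theorem bMatchesAny_iff (lowered : List String) (t : List Char)
    (hne : ∀ p ∈ lowered, p.toList ≠ []) :
    bMatchesAny (bBuildIndex lowered) t = true
      ↔ ∃ p ∈ lowered, p.toList <:+: t := by
  induction t with
  | nil =>
      simp only [bMatchesAny, Bool.false_eq_true, false_iff]
      rintro ⟨p, hp, hinf⟩
      exact hne p hp (List.eq_nil_of_infix_nil hinf)
  | cons c rest ih =>
      simp only [bMatchesAny]
      split_ifs with h
      · simp only [true_iff]
        obtain ⟨q, hq, hpre⟩ := (bStartsHere_iff _ _).mp h
        rw [getD_bBuildIndex] at hq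
        obtain ⟨p, hp, rfl⟩ := List.mem_map.mp (List.mem_of_mem_filter hq)
        exact ⟨p, hp, hpre.isInfix⟩
      · rw [ih]
        constructor
        · rintro ⟨p, hp, hinf⟩
          exact ⟨p, hp, hinf.trans (List.infix_cons (List.infix_refl rest))⟩
        · rintro ⟨p, hp, hinf⟩
          rcases List.infix_cons_iff.mp hinf with hpre | hinf'
          · have hlne : p.toList ≠ [] := hne p hp
            have hhead : p.toList.headI = c := by
              obtain ⟨x, xs, hx⟩ := List.exists_cons_of_ne_nil hlne
              rw [hx] at hpre ⊢
              obtain ⟨u, hu⟩ := hpre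
              simpa using congrArg List.headI hu
            refine absurd ((bStartsHere_iff _ _).mpr ⟨p.toList, ?_, hpre⟩) h
            rw [getD_bBuildIndex]
            exact List.mem_filter.mpr ⟨List.mem_map_of_mem hp, by simp [hhead]⟩
          · exact ⟨p, hp, hinf'⟩

theorem aScan_iff (company : String) (l : List String) :
    aScan company l = true ↔
      ∃ e ∈ l, PySem.Chars.lower e.toList <:+: PySem.Chars.lower company.toList := by
  induction l with
  | nil => simp [aScan]
  | cons e rest ih =>
      simp only [aScan]
      split_ifs with h
      · simp only [true_iff]
        have := (PySem.Str.isIn_iff_infix _ _).mp h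
        rw [PySem.Str.toList_lower, PySem.Str.toList_lower] at this
        exact ⟨e, List.mem_cons_self, this⟩
      · rw [ih]
        constructor
        · rintro ⟨q, hq, hinf⟩; exact ⟨q, List.mem_cons_of_mem _ hq, hinf⟩
        · rintro ⟨q, hq, hinf⟩
          rcases List.mem_cons.mp hq with rfl | hq'
          · refine absurd ((PySem.Str.isIn_iff_infix _ _).mpr ?_) h
            rw [PySem.Str.toList_lower, PySem.Str.toList_lower]; exact hinf
          · exact ⟨q, hq', hinf⟩

-- B's hand-written lowercase lists are exactly A's lists lowered, pattern by pattern
theorem exclude_lower_eq :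
    EXCLUDE_LOWER.map String.toList
      = EXCLUDE_COMPANIES.map (fun e => PySem.Chars.lower e.toList) := by decide

theorem indicator_lower_eq :
    INDICATOR_LOWER.map String.toList
      = SMALL_BUSINESS_INDICATORS.map (fun e => PySem.Chars.lower e.toList) := by decide

theorem scan_eq_matches (company : String) (l m : List String)
    (hmap : m.map String.toList = l.map (fun e => PySem.Chars.lower e.toList))
    (hne : ∀ p ∈ m, p.toList ≠ []) :
    aScan company l = bMatchesAny (bBuildIndex m) (PySem.Chars.lower company.toList) := by
  have key : (∃ p ∈ m, p.toList <:+: PySem.Chars.lower company.toList)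
      ↔ ∃ e ∈ l, PySem.Chars.lower e.toList <:+: PySem.Chars.lower company.toList := by
    constructor
    · rintro ⟨p, hp, hinf⟩
      have : p.toList ∈ l.map (fun e => PySem.Chars.lower e.toList) := by
        rw [← hmap]; exact List.mem_map_of_mem hp
      obtain ⟨e, he, heq⟩ := List.mem_map.mp this
      exact ⟨e, he, heq ▸ hinf⟩
    · rintro ⟨e, he, hinf⟩
      have : PySem.Chars.lower e.toList ∈ m.map String.toList := by
        rw [hmap]; exact List.mem_map_of_mem he
      obtain ⟨p, hp, heq⟩ := List.mem_map.mp this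
      exact ⟨p, hp, heq ▸ hinf⟩
  rcases hb : bMatchesAny (bBuildIndex m) (PySem.Chars.lower company.toList) with _ | _
  · rw [Bool.eq_false_iff]
    intro ha
    exact absurd ((bMatchesAny_iff m _ hne).mpr (key.mpr ((aScan_iff company l).mp ha)))
      (by simp [hb])
  · exact (aScan_iff company l).mpr (key.mp ((bMatchesAny_iff m _ hne).mp hb))

-- ===== VERDICT =====
theorem is_small_business_spec : Claim_equal_is_small_business := by
  intro company _
  unfold Spec_is_small_business is_small_business is_small_business_alt
      bExcludeIndex bIndicatorIndex
  rw [scan_eq_matches company EXCLUDE_COMPANIES EXCLUDE_LOWER exclude_lower_eq (by decide),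
      scan_eq_matches company SMALL_BUSINESS_INDICATORS INDICATOR_LOWER indicator_lower_eq (by decide)]
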